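-- pv_equiv track=rewrite | github.com/jozerozero/tacotron_gmm | tacotron/utils/text.py | split_by_single_space
-- ===== SOURCE A (Python) =====
-- def split_by_single_space(text):
--     res=[]
--     cur_str=''
--     space_cnt=0
--     for ch in text:
--         if ch ==' ' and space_cnt != 1:
--             space_cnt = (space_cnt+1)
--             res.append(cur_str)
--             cur_str=''
--         else:
--             space_cnt=0
--             cur_str+=ch
--     if cur_str != '':
--         res.append(cur_str)
--     return res
-- ===== SOURCE B (Python) =====
-- def split_by_single_space(text):
--     # pass 1: record the indices of separator spaces (a space is a separator
--     # iff the previous character was not itself a separator space)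
--     seps = []
--     prev_sep = False
--     for i, ch in enumerate(text):
--         if ch == ' ' and not prev_sep:
--             seps.append(i)
--             prev_sep = True
--         else:
--             prev_sep = False
--     # pass 2: slice the text at the separator positions
--     res = []
--     start = 0
--     for p in seps:
--         res.append(text[start:p])
--         start = p + 1
--     tail = text[start:]
--     if tail != '':
--         res.append(tail)
--     return res
-- ===== Notes on version B (the rewrite author's own statement) =====
-- stated objective: alternative
-- what changed: B replaces A's single accumulate-and-flush loop (growing cur_str character by character) with two passes: first collect the indices of separator spaces, then slice the text at those indices.
import Mathlib
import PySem

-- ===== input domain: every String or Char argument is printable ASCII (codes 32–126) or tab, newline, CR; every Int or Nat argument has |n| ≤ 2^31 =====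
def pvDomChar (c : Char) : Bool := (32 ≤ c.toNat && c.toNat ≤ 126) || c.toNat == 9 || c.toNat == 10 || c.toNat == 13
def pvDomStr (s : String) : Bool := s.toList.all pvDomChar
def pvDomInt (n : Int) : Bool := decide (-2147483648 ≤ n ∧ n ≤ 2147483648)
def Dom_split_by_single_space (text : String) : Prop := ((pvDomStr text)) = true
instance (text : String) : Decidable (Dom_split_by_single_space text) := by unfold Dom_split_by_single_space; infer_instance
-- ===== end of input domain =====

-- B is an alternative two-pass implementation (collect separator indices, then slice);
-- equivalence of return values is proved on all inputs (both programs are total).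

-- ===== PORT A =====
-- loop body of A: (res, cur_str, space_cnt) is the state
def pvStepA (st : List String × List Char × Int) (ch : Char) : List String × List Char × Int :=
  if ch = ' ' ∧ st.2.2 ≠ 1 then (st.1 ++ [String.mk st.2.1], [], st.2.2 + 1)
  else (st.1, st.2.1 ++ [ch], 0)

-- A's final 'if cur_str != ""' step
def pvFinA (st : List String × List Char × Int) : List String :=
  if st.2.1 ≠ [] then st.1 ++ [String.mk st.2.1] else st.1

def split_by_single_space (text : String) : List String :=
  pvFinA (text.toList.foldl pvStepA ([], [], 0))

-- ===== PORT B =====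
-- pass 1 body: state (seps, prev_sep), input one (index, char) pair of enumerate(text)
def pvStepSep (st : List Int × Bool) (ic : Int × Char) : List Int × Bool :=
  if ic.2 = ' ' ∧ st.2 = false then (st.1 ++ [ic.1], true) else (st.1, false)

-- pass 2 body: state (res, start); appends text[start:p], sets start = p+1
def pvStepSl (cs : List Char) (st : List String × Int) (p : Int) : List String × Int :=
  (st.1 ++ [String.mk (PySem.List.slice cs (some st.2) (some p))], p + 1)

-- B's final step: tail = text[start:]; append it iff non-empty
def pvFinB (cs : List Char) (st : List String × Int) : List String :=
  if PySem.List.slice cs (some st.2) none ≠ [] then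
    st.1 ++ [String.mk (PySem.List.slice cs (some st.2) none)]
  else st.1

def split_by_single_space_alt (text : String) : List String :=
  let cs := text.toList
  let fp := (PySem.List.enumerate cs).foldl pvStepSep ([], false)
  pvFinB cs (fp.1.foldl (pvStepSl cs) ([], 0))

-- ===== PRECONDITION & SPEC =====
def Spec_split_by_single_space (text : String) (out : List String) : Prop := out = split_by_single_space_alt text
instance (text : String) (out : List String) : Decidable (Spec_split_by_single_space text out) := by unfold Spec_split_by_single_space; infer_instance

-- ===== CLAIM (what is proved, stated in full; the proofs are below) =====
def Claim_equal_split_by_single_space : Prop := ∀ (text : String), Dom_split_by_single_space text → Spec_split_by_single_space text (split_by_single_space text)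

-- ===== LEMMAS AND PROOFS =====

-- prepend x onto the first fragment (creating it if there is none)
def pvConsH (x : List Char) : List (List Char) → List (List Char)
  | [] => [x]
  | f :: rest => (x ++ f) :: rest

-- the common functional description: fragments of cs given the prev-was-separator flag b
def pvGo : List Char → Bool → List (List Char)
  | [], _ => [[]]
  | c :: cs, b => if c = ' ' ∧ b = false then [] :: pvGo cs true else pvConsH [c] (pvGo cs false)

-- turn fragments into the result, dropping the last fragment iff it is empty
def pvFinalize : List (List Char) → List String
  | [] => []
  | [f] => if f = [] then [] else [String.mk f]
  | f :: g :: rest => String.mk f :: pvFinalize (g :: rest)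

-- separator indices of cs, indexing from n, with prev-flag b
def pvS : Nat → List Char → Bool → List Int
  | _, [], _ => []
  | n, c :: cs, b => if c = ' ' ∧ b = false then (n : Int) :: pvS (n + 1) cs true else pvS (n + 1) cs false

theorem pvConsH_ne (x : List Char) (l : List (List Char)) : pvConsH x l ≠ [] := by
  cases l <;> simp [pvConsH]

theorem pvGo_ne (cs : List Char) (b : Bool) : pvGo cs b ≠ [] := by
  cases cs with
  | nil => simp [pvGo]
  | cons c cs =>
    simp only [pvGo]
    split
    · simp
    · exact pvConsH_ne _ _

theorem pvConsH_consH (x y : List Char) (l : List (List Char)) :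
    pvConsH x (pvConsH y l) = pvConsH (x ++ y) l := by
  cases l <;> simp [pvConsH]

theorem pvConsH_nil (l : List (List Char)) (h : l ≠ []) : pvConsH [] l = l := by
  cases l with
  | nil => exact absurd rfl h
  | cons f rest => simp [pvConsH]

theorem pvFinalize_cons (f : List Char) (l : List (List Char)) (h : l ≠ []) :
    pvFinalize (f :: l) = String.mk f :: pvFinalize l := by
  cases l with
  | nil => exact absurd rfl h
  | cons g rest => rfl

def pvBI (b : Bool) : Int := if b then 1 else 0

theorem pvA_loop (cs : List Char) : ∀ (res : List String) (cur : List Char) (b : Bool),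
    pvFinA (cs.foldl pvStepA (res, cur, pvBI b))
      = res ++ pvFinalize (pvConsH cur (pvGo cs b)) := by
  induction cs with
  | nil =>
    intro res cur b
    by_cases hc : cur = [] <;> simp [pvFinA, pvGo, pvConsH, pvFinalize, hc]
  | cons c cs ih =>
    intro res cur b
    by_cases hsep : c = ' ' ∧ b = false
    · obtain ⟨hc, hb⟩ := hsep; subst hc; subst hb
      have h1 : pvStepA (res, cur, pvBI false) ' ' = (res ++ [String.mk cur], [], pvBI true) := by
        simp [pvStepA, pvBI]
      simp only [List.foldl_cons, h1, ih]
      have hgo : pvGo (' ' :: cs) false = [] :: pvGo cs true := by simp [pvGo]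
      have hch : pvConsH cur ([] :: pvGo cs true) = cur :: pvGo cs true := by simp [pvConsH]
      rw [pvConsH_nil _ (pvGo_ne cs true), hgo, hch, pvFinalize_cons _ _ (pvGo_ne cs true)]
      simp
    · have h1 : pvStepA (res, cur, pvBI b) c = (res, cur ++ [c], pvBI false) := by
        rcases Bool.eq_false_or_eq_true b with hb | hb <;> subst hb <;>
          simp_all [pvStepA, pvBI]
      simp only [List.foldl_cons, h1, ih]
      have hgo : pvGo (c :: cs) b = pvConsH [c] (pvGo cs false) := by
        rcases Bool.eq_false_or_eq_true b with hb | hb <;> subst hb <;> simp_all [pvGo]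
      rw [hgo, pvConsH_consH]

theorem pvB1' (cs : List Char) : ∀ (n : Nat) (acc : List Int) (b : Bool),
    ((PySem.List.enumerate cs (n : Int)).foldl pvStepSep (acc, b)).1
      = acc ++ pvS n cs b := by
  induction cs with
  | nil => intro n acc b; simp [PySem.List.enumerate_nil, pvS]
  | cons c cs ih =>
    intro n acc b
    rw [PySem.List.enumerate_cons]
    have hcast : ((n : Int) + 1) = ((n + 1 : Nat) : Int) := by push_cast; ring
    by_cases hsep : c = ' ' ∧ b = false
    · simp only [List.foldl_cons, pvStepSep, if_pos hsep, hcast, ih]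
      simp [pvS, hsep]
    · simp only [List.foldl_cons, pvStepSep, if_neg hsep, hcast, ih]
      rcases Bool.eq_false_or_eq_true b with hb | hb <;>
        · subst hb; simp_all [pvS]

theorem pvB2 (full : List Char) : ∀ (cs : List Char) (n start : Nat) (res : List String) (b : Bool),
    start ≤ n → full.drop n = cs →
    pvFinB full ((pvS n cs b).foldl (pvStepSl full) (res, (start : Int)))
      = res ++ pvFinalize (pvConsH ((full.drop start).take (n - start)) (pvGo cs b)) := by
  intro cs
  induction cs generalizing full with
  | nil =>
    intro n start res b hle hdrop
    have hlen : full.length ≤ n := by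
      have := List.drop_eq_nil_iff.mp hdrop; omega
    have htake : (full.drop start).take (n - start) = full.drop start := by
      apply List.take_of_length_le; simp; omega
    simp only [pvS, List.foldl_nil, pvFinB, PySem.List.slice_from_natCast, htake]
    by_cases ht : full.drop start = [] <;>
      simp [pvGo, pvConsH, pvFinalize, ht]
  | cons c cs ih =>
    intro n start res b hle hdrop
    have hn : n < full.length := by
      by_contra h
      rw [List.drop_eq_nil_iff.mpr (by omega)] at hdrop; simp at hdrop
    have hdrop1 : full.drop (n + 1) = cs := by
      have h := congrArg (List.drop 1) hdrop
      simpa [List.drop_drop, Nat.add_comm] using h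
    have hsplit : (full.drop start).take (n + 1 - start)
        = (full.drop start).take (n - start) ++ [c] := by
      have hd : (full.drop start).drop (n - start) = c :: cs := by
        rw [List.drop_drop, show start + (n - start) = n by omega, hdrop]
      rw [show n + 1 - start = (n - start) + 1 by omega, List.take_add, hd]
      rfl
    by_cases hsep : c = ' ' ∧ b = false
    · obtain ⟨hc, hb⟩ := hsep; subst hc; subst hb
      have hcur : PySem.List.slice full (some (start : Int)) (some (n : Int))
          = (full.drop start).take (n - start) := PySem.List.slice_natCast ..
      rw [show pvS n (' ' :: cs) false = (n : Int) :: pvS (n + 1) cs true by simp [pvS]]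
      simp only [List.foldl_cons, pvStepSl, hcur]
      have hcast : ((n : Int) + 1) = ((n + 1 : Nat) : Int) := by push_cast; ring
      rw [hcast, ih full (n + 1) (n + 1) _ true (le_refl _) hdrop1]
      simp only [Nat.sub_self, List.take_zero]
      rw [pvConsH_nil _ (pvGo_ne cs true)]
      have hgo : pvGo (' ' :: cs) false = [] :: pvGo cs true := by simp [pvGo]
      have hch : pvConsH ((full.drop start).take (n - start)) ([] :: pvGo cs true)
          = ((full.drop start).take (n - start)) :: pvGo cs true := by simp [pvConsH]
      rw [hgo, hch, pvFinalize_cons _ _ (pvGo_ne cs true)]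
      simp
    · simp only [pvS, if_neg hsep]
      rw [ih full (n + 1) start _ false (by omega) hdrop1, hsplit]
      have hgo : pvGo (c :: cs) b = pvConsH [c] (pvGo cs false) := by
        rcases Bool.eq_false_or_eq_true b with hb | hb <;> subst hb <;>
          simp_all [pvGo]
      rw [hgo, pvConsH_consH]

-- ===== VERDICT (by name: the statement is the Claim_ definition above) =====
theorem split_by_single_space_spec : Claim_equal_split_by_single_space := by
  intro text _
  unfold Spec_split_by_single_space split_by_single_space split_by_single_space_alt
  have hA := pvA_loop text.toList [] [] false
  rw [show pvBI false = (0 : Int) from rfl, pvConsH_nil _ (pvGo_ne _ _), List.nil_append] at hA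
  have hB1 := pvB1' text.toList 0 [] false
  simp only [Nat.cast_zero, List.nil_append] at hB1
  have hB2 := pvB2 text.toList text.toList 0 0 [] false (le_refl _) (by simp)
  simp only [Nat.cast_zero, Nat.sub_self, List.take_zero, List.nil_append] at hB2
  rw [pvConsH_nil _ (pvGo_ne _ _)] at hB2
  simp only []
  rw [hA, hB1, hB2]
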